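-- pv_equiv track=rewrite | github.com/IvanoMaker/Python-Sliding-Tile-Puzzle-Solver | main.py | find_all_moves
-- ===== SOURCE A (Python) =====
-- GRID_SIZE = 3
--
-- def board_to_tuple(board):
--     return tuple(tuple(row) for row in board)
--
-- def tuple_to_board(t):
--     return [list(row) for row in t]
--
-- def find_all_moves(board_t):
--     board = tuple_to_board(board_t) # expand tuple back to board
--     # Locate the blank
--     for i in range(GRID_SIZE):
--         for j in range(GRID_SIZE):
--             if board[i][j] is None:
--                 blank_pos = (i, j)
--                 break
--         else:
--             continue
--         break
--     # Generate neighbors by sliding tiles into the blank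
--     neighbors = []                                      # list of neighbor board tuples
--     for dx, dy in [(-1,0),(1,0),(0,-1),(0,1)]:          # up, down, left, right
--         x, y = blank_pos[0] + dx, blank_pos[1] + dy     # new position
--         if 0 <= x < GRID_SIZE and 0 <= y < GRID_SIZE:   # if it is a valid position
--             # Swap blank and tile
--             board[blank_pos[0]][blank_pos[1]], board[x][y] = board[x][y], None
--             neighbors.append(board_to_tuple(board))
--             # Swap back
--             board[blank_pos[0]][blank_pos[1]], board[x][y] = None, board[blank_pos[0]][blank_pos[1]]
--     return neighbors # return list of neighbor board tuples
-- ===== SOURCE B (Python) =====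
-- GRID_SIZE = 3
--
-- def find_all_moves(board_t):
--     # first blank in the top-left GRID_SIZE x GRID_SIZE window, scan order
--     bi, bj = next((i, j) for i in range(GRID_SIZE) for j in range(GRID_SIZE)
--                   if board_t[i][j] is None)
--
--     def swapped(x, y):
--         # board with the tile at (x, y) moved onto the blank, built functionally
--         tile = board_t[x][y]
--         return tuple(tuple(tile if (i, j) == (bi, bj) else
--                            None if (i, j) == (x, y) else cell
--                            for j, cell in enumerate(row))
--                      for i, row in enumerate(board_t))
--
--     return [swapped(bi + dx, bj + dy)
--             for dx, dy in ((-1, 0), (1, 0), (0, -1), (0, 1))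
--             if 0 <= bi + dx < GRID_SIZE and 0 <= bj + dy < GRID_SIZE]
-- ===== Notes on version B (the rewrite author's own statement) =====
-- stated objective: idiomatic
-- what changed: B finds the blank with a next() over a generator expression and builds each neighbor purely via coordinate-mapped enumerate comprehensions (replace cell (bi,bj) by the tile and (x,y) by None), instead of A's expand-to-lists, nested loops with break/else, and in-place double swap with swap-back.
import Mathlib
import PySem

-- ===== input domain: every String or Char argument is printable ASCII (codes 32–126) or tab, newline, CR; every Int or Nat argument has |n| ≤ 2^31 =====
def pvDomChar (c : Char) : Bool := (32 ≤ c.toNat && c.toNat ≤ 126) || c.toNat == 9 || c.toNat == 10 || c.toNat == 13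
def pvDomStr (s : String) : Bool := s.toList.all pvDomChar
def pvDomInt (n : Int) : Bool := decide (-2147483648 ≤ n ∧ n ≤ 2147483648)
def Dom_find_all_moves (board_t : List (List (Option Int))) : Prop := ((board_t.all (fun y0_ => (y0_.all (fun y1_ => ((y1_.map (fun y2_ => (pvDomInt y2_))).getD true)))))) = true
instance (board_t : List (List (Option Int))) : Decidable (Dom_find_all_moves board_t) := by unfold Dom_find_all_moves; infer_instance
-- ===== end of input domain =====

-- B rebuilds each neighbor board purely (coordinate-mapped enumerate comprehension from the first
-- blank found by a generator scan) instead of A's nested-list mutation with swap-back; objective: idiomatic.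


-- ===== PORT A =====
-- board[i][j] step of the blank-search loop (indices come from range(3), hence Nat indexing is
-- exact Python indexing here); `none` where Python raises IndexError (outside Pre_)
def pvScanCellA (b : List (List (Option Int))) (i j : Nat) : Option (Nat × Nat) :=
  match b[i]? with
  | none => none                     -- Python IndexError; outside Pre_
  | some row =>
    match row[j]? with
    | none => none                   -- Python IndexError; outside Pre_
    | some cell => if cell = none then some (i, j) else none

-- the nested search loop with Python's break/else/continue: keeps the first hit, skips the rest;
-- `none` result corresponds to Python's UnboundLocalError (outside Pre_)
def pvFindBlankA (board : List (List (Option Int))) : Option (Nat × Nat) :=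
  (List.range 3).foldl (fun acc i =>
    acc.orElse (fun _ => (List.range 3).foldl (fun acc2 j =>
      acc2.orElse (fun _ => pvScanCellA board i j)) none)) none

-- board[i][j] := v  (i, j are guarded in-window Python ints, hence Nat)
def pvSetCell (b : List (List (Option Int))) (i j : Nat) (v : Option Int) : List (List (Option Int)) :=
  b.set i ((b.getD i []).set j v)

def find_all_moves (board_t : List (List (Option Int))) : List (List (List (Option Int))) :=
  let board := board_t.map (fun row => row)       -- tuple_to_board (contents unchanged)
  match pvFindBlankA board with
  | none => []                                     -- Python raises UnboundLocalError; outside Pre_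
  | some (bi, bj) =>
    ([((-1 : Int), (0 : Int)), (1, 0), (0, -1), (0, 1)]).foldl (fun neighbors d =>
      let x : Int := (bi : Int) + d.1
      let y : Int := (bj : Int) + d.2
      if 0 ≤ x ∧ x < 3 ∧ 0 ≤ y ∧ y < 3 then
        -- Python mutates board[bi][bj] := board[x][y], board[x][y] := None, snapshots, swaps back;
        -- functionally the snapshot is this double-set of the (restored) original board:
        neighbors ++ [pvSetCell (pvSetCell board bi bj ((board.getD x.toNat []).getD y.toNat none))
                        x.toNat y.toNat none]
      else neighbors) []

-- ===== PORT B =====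
-- board_t[i][j] as an optional value (`none` = Python IndexError, outside Pre_)
def pvCell (b : List (List (Option Int))) (i j : Int) : Option (Option Int) :=
  (PySem.List.pyGet? b i).bind (fun r => PySem.List.pyGet? r j)

-- the generator ((i, j) for i in range(3) for j in range(3) if board_t[i][j] is None); next(...)
def pvPairs : List (Int × Int) :=
  (PySem.List.pyRange 0 3 1).flatMap (fun i => (PySem.List.pyRange 0 3 1).map (fun j => (i, j)))

def pvNextBlank (b : List (List (Option Int))) : Option (Int × Int) :=
  pvPairs.find? (fun p => pvCell b p.1 p.2 == some none)

-- swapped(x, y): the board with the tile at (x, y) moved onto the blank, built by comprehension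
def pvSwapped (b : List (List (Option Int))) (bi bj x y : Int) : List (List (Option Int)) :=
  let tile := (pvCell b x y).getD none             -- board_t[x][y]; the cell exists under Pre_
  (PySem.List.enumerate b).map (fun ir =>
    (PySem.List.enumerate ir.2).map (fun jc =>
      if (ir.1, jc.1) = (bi, bj) then tile
      else if (ir.1, jc.1) = (x, y) then none
      else jc.2))

def find_all_moves_alt (board_t : List (List (Option Int))) : List (List (List (Option Int))) :=
  match pvNextBlank board_t with
  | none => []                                     -- Python: next() raises StopIteration; outside Pre_
  | some (bi, bj) =>
    (([((-1 : Int), (0 : Int)), (1, 0), (0, -1), (0, 1)]).filter (fun d =>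
        decide (0 ≤ bi + d.1) && decide (bi + d.1 < 3) &&
        decide (0 ≤ bj + d.2) && decide (bj + d.2 < 3))).map
      (fun d => pvSwapped board_t bi bj (bi + d.1) (bj + d.2))

-- ===== PRECONDITION & SPEC =====
-- Pre_ = exactly the inputs on which the Python A returns: the row-major scan of the top-left 3×3
-- window hits a None before any missing cell (otherwise IndexError / UnboundLocalError), and the
-- in-window neighbours of that first blank all exist (otherwise IndexError while swapping).
def Pre_find_all_moves (board_t : List (List (Option Int))) : Prop :=
  ∃ i ∈ ([0, 1, 2] : List Nat), ∃ j ∈ ([0, 1, 2] : List Nat),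
    pvCell board_t i j = some none ∧
    (∀ i' ∈ ([0, 1, 2] : List Nat), ∀ j' ∈ ([0, 1, 2] : List Nat), (i' < i ∨ (i' = i ∧ j' < j)) →
        pvCell board_t i' j' ≠ none ∧ pvCell board_t i' j' ≠ some none) ∧
    (∀ x ∈ ([0, 1, 2] : List Nat), ∀ y ∈ ([0, 1, 2] : List Nat),
        ((x = i ∧ (y = j + 1 ∨ y + 1 = j)) ∨ (y = j ∧ (x = i + 1 ∨ x + 1 = i))) →
        pvCell board_t (x : Int) (y : Int) ≠ none)
instance (board_t : List (List (Option Int))) : Decidable (Pre_find_all_moves board_t) := by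
  unfold Pre_find_all_moves; infer_instance

def pvWitness_find_all_moves : List (List (Option Int)) :=
  [[some 1, some 2, some 3], [some 4, none, some 5], [some 6, some 7, some 8]]

def Spec_find_all_moves (board_t : List (List (Option Int))) (out : List (List (List (Option Int)))) : Prop := out = find_all_moves_alt board_t
instance (board_t : List (List (Option Int))) (out : List (List (List (Option Int)))) : Decidable (Spec_find_all_moves board_t out) := by unfold Spec_find_all_moves; infer_instance

-- ===== CLAIM (what is proved, stated in full; the proofs are below) =====
def Claim_equal_find_all_moves : Prop := ∀ (board_t : List (List (Option Int))), Dom_find_all_moves board_t → Pre_find_all_moves board_t → Spec_find_all_moves board_t (find_all_moves board_t)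

-- ===== LEMMAS AND PROOFS =====

-- a first-hit foldl is findSome?
theorem pv_foldl_orElse {α β : Type} (f : α → Option β) :
    ∀ (L : List α) (acc : Option β),
      L.foldl (fun a x => a.orElse (fun _ => f x)) acc
        = acc.orElse (fun _ => L.findSome? f) := by
  intro L
  induction L with
  | nil => intro acc; cases acc <;> simp
  | cons x L ih =>
    intro acc
    cases acc with
    | some r =>
      simp only [List.foldl_cons]
      rw [show ((some r).orElse (fun _ => f x) : Option β) = some r from rfl, ih]
      rfl
    | none =>
      simp only [List.foldl_cons, List.findSome?_cons]
      rw [ih]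
      cases f x <;> simp [Option.orElse]

-- find? as findSome?
theorem pv_find?_eq_findSome? {α : Type} (q : α → Bool) :
    ∀ (L : List α), L.find? q = L.findSome? (fun x => if q x then some x else none) := by
  intro L
  induction L with
  | nil => simp
  | cons x L ih =>
    by_cases hx : q x <;> simp [hx, ih]

-- the two blank scans agree (up to the Int/Nat index representation), for every board
theorem pv_scan_eq (b : List (List (Option Int))) :
    pvNextBlank b = (pvFindBlankA b).map (fun p => ((p.1 : Int), (p.2 : Int))) := by
  have hcell : ∀ i j : Nat,
      (if pvCell b (i : Int) (j : Int) == some none then some ((i : Int), (j : Int)) else none)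
        = (pvScanCellA b i j).map (fun p : Nat × Nat => ((p.1 : Int), (p.2 : Int))) := by
    intro i j
    unfold pvScanCellA pvCell
    rw [PySem.List.pyGet?_natCast]
    rcases hb : b[i]? with _ | r
    · simp
    · simp only [Option.bind_some, PySem.List.pyGet?_natCast]
      rcases hr : r[j]? with _ | c
      · simp
      · rcases c <;> simp
  unfold pvNextBlank pvFindBlankA
  rw [pv_find?_eq_findSome?]
  rw [show pvPairs = [((0:Int),(0:Int)),(0,1),(0,2),(1,0),(1,1),(1,2),(2,0),(2,1),(2,2)] from by decide]
  rw [show (List.range 3) = [0, 1, 2] from rfl]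
  rw [pv_foldl_orElse]
  simp only [pv_foldl_orElse, List.findSome?_cons, List.findSome?_nil]
  have h00 := hcell 0 0
  have h01 := hcell 0 1
  have h02 := hcell 0 2
  have h10 := hcell 1 0
  have h11 := hcell 1 1
  have h12 := hcell 1 2
  have h20 := hcell 2 0
  have h21 := hcell 2 1
  have h22 := hcell 2 2
  push_cast at h00 h01 h02 h10 h11 h12 h20 h21 h22
  simp only [h00, h01, h02, h10, h11, h12, h20, h21, h22]
  rcases pvScanCellA b 0 0 with _ | p00 <;>
    rcases pvScanCellA b 0 1 with _ | p01 <;>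
    rcases pvScanCellA b 0 2 with _ | p02 <;>
    rcases pvScanCellA b 1 0 with _ | p10 <;>
    rcases pvScanCellA b 1 1 with _ | p11 <;>
    rcases pvScanCellA b 1 2 with _ | p12 <;>
    rcases pvScanCellA b 2 0 with _ | p20 <;>
    rcases pvScanCellA b 2 1 with _ | p21 <;>
    rcases pvScanCellA b 2 2 with _ | p22 <;> simp

-- a coordinate-mapped rewrite of one row: no index hit
theorem pv_enum_map_snd (r : List (Option Int)) :
    (PySem.List.enumerate r).map (fun jc => jc.2) = r :=
  PySem.List.map_snd_enumerate r 0

-- a coordinate-mapped rewrite of one row: one index hit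
theorem pv_enum_map_set1 (r : List (Option Int)) (j0 : Nat) (w : Option Int) :
    (PySem.List.enumerate r).map (fun jc => if jc.1 = (j0 : Int) then w else jc.2)
      = r.set j0 w := by
  apply List.ext_getElem?
  intro n
  simp only [List.getElem?_map, PySem.List.getElem?_enumerate, List.getElem?_set]
  rcases hrn : r[n]? with _ | c
  · have hle : r.length ≤ n := by simpa using List.getElem?_eq_none_iff.mp hrn
    simp only [Option.map_none]
    split_ifs with h1 h2
    · omega
    · rfl
    · rfl
  · have hlt : n < r.length := by
      by_contra hc
      simp [List.getElem?_eq_none_iff.mpr (by omega : r.length ≤ n)] at hrn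
    simp only [Option.map_some]
    by_cases h : j0 = n
    · subst h; simp [hlt]
    · have hc : ((n : Int)) ≠ ((j0 : Int)) := by exact_mod_cast fun hh : n = j0 => h hh.symm
      simp [hc, h]

-- a coordinate-mapped rewrite of one row: two index hits
theorem pv_enum_map_set2 (r : List (Option Int)) (j1 j2 : Nat) (w1 w2 : Option Int)
    (h : j1 ≠ j2) :
    (PySem.List.enumerate r).map
        (fun jc => if jc.1 = (j1 : Int) then w1 else if jc.1 = (j2 : Int) then w2 else jc.2)
      = (r.set j1 w1).set j2 w2 := by
  apply List.ext_getElem?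
  intro n
  simp only [List.getElem?_map, PySem.List.getElem?_enumerate, List.getElem?_set,
    List.length_set]
  rcases hrn : r[n]? with _ | c
  · have hle : r.length ≤ n := by simpa using List.getElem?_eq_none_iff.mp hrn
    simp only [Option.map_none]
    split_ifs <;> first | rfl | omega
  · have hlt : n < r.length := by
      by_contra hc
      simp [List.getElem?_eq_none_iff.mpr (by omega : r.length ≤ n)] at hrn
    simp only [Option.map_some]
    by_cases h1 : j1 = n
    · subst h1
      simp [hlt, Ne.symm h]
    · by_cases h2 : j2 = n
      · subst h2
        have hc1 : ((j2 : Int)) ≠ ((j1 : Int)) := by exact_mod_cast Ne.symm h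
        simp [hlt, hc1]
      · have hc1 : ((n : Int)) ≠ ((j1 : Int)) := by exact_mod_cast fun hh : n = j1 => h1 hh.symm
        have hc2 : ((n : Int)) ≠ ((j2 : Int)) := by exact_mod_cast fun hh : n = j2 => h2 hh.symm
        simp [hc1, hc2, h1, h2]

-- the two ways of reading board[x][y] with defaults coincide
theorem pv_tile_eq (b : List (List (Option Int))) (x y : Nat) :
    (pvCell b (x : Int) (y : Int)).getD none = (b.getD x []).getD y none := by
  unfold pvCell
  simp only [PySem.List.pyGet?_natCast, List.getD_eq_getElem?_getD]
  rcases hbx : b[x]? with _ | r <;> simp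

-- B's comprehension rebuild = A's double set, for every board and distinct in-window coordinates
theorem pv_swapped_eq (b : List (List (Option Int))) (bi bj x y : Nat)
    (h : ¬(bi = x ∧ bj = y)) :
    pvSwapped b (bi : Int) (bj : Int) (x : Int) (y : Int)
      = pvSetCell (pvSetCell b bi bj ((b.getD x []).getD y none)) x y none := by
  unfold pvSwapped pvSetCell
  rw [pv_tile_eq]
  apply List.ext_getElem?
  intro k
  simp only [List.getElem?_map, PySem.List.getElem?_enumerate, List.getElem?_set,
    List.length_set, zero_add]
  rcases hbk : b[k]? with _ | r
  · have hle : b.length ≤ k := by simpa using List.getElem?_eq_none_iff.mp hbk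
    simp only [Option.map_none]
    split_ifs <;> first | rfl | omega
  · have hlt : k < b.length := by
      by_contra hc
      simp [List.getElem?_eq_none_iff.mpr (by omega : b.length ≤ k)] at hbk
    have hgd : b.getD k [] = r := by
      simp [List.getD_eq_getElem?_getD, hbk]
    simp only [Option.map_some, Prod.mk.injEq]
    by_cases hkb : k = bi
    · by_cases hkx : k = x
      · -- k = bi = x, so bj ≠ y: the row gets both edits
        have hbjy : bj ≠ y := fun hh => h ⟨by omega, hh⟩
        subst hkb; subst hkx
        have hset : ∀ R, (b.set k R).getD k [] = R := by
          intro R; simp [List.getD_eq_getElem?_getD, List.getElem?_set, hlt]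
        simp only [if_pos rfl, hlt, if_true, hgd, true_and]
        rw [pv_enum_map_set2 r bj y _ none hbjy, hset]
      · -- k = bi ≠ x: the row only gets the blank replaced
        subst hkb
        have hcx : ¬ ((k : Int) = (x : Int)) := by exact_mod_cast hkx
        have hxk : ¬ (x = k) := fun hh => hkx hh.symm
        simp only [hcx, false_and, if_false, if_neg hxk, true_and, if_pos rfl, hlt, if_true, hgd]
        rw [pv_enum_map_set1 r bj ((b.getD x []).getD y none)]
      -- (bi ≠ k)
    · by_cases hkx : k = x
      · -- k = x ≠ bi: the row only loses the moved tile
        subst hkx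
        have hcb : ¬ ((k : Int) = (bi : Int)) := by exact_mod_cast hkb
        have hbik : ¬ (bi = k) := fun hh => hkb hh.symm
        have hset : ∀ R, (b.set bi R).getD k [] = r := by
          intro R; simp [List.getD_eq_getElem?_getD, List.getElem?_set, hbik, hbk]
        simp only [hcb, false_and, if_false, if_pos rfl, hlt, if_true, hgd, true_and]
        rw [pv_enum_map_set1 r y none, hset]
      · -- untouched row
        have hcb : ¬ ((k : Int) = (bi : Int)) := by exact_mod_cast hkb
        have hcx : ¬ ((k : Int) = (x : Int)) := by exact_mod_cast hkx
        have hxk : ¬ (x = k) := fun hh => hkx hh.symm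
        have hbik : ¬ (bi = k) := fun hh => hkb hh.symm
        simp only [hcb, hcx, false_and, if_false, if_neg hxk, if_neg hbik, hbk]
        rw [pv_enum_map_snd]

-- a scan hit is the scanned pair itself
theorem pv_scanCell_eq (b : List (List (Option Int))) (i j : Nat) (p : Nat × Nat)
    (h : pvScanCellA b i j = some p) : p = (i, j) := by
  unfold pvScanCellA at h
  rcases hb : b[i]? with _ | r <;> simp only [hb] at h
  · exact absurd h (by simp)
  · rcases hr : r[j]? with _ | c <;> simp only [hr] at h
    · exact absurd h (by simp)
    · by_cases hc : c = none <;> simp [hc] at h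
      exact h.symm

-- the blank found by A's scan lies in the 3×3 window
theorem pv_blank_lt (b : List (List (Option Int))) (bi bj : Nat)
    (hA : pvFindBlankA b = some (bi, bj)) : bi < 3 ∧ bj < 3 := by
  unfold pvFindBlankA at hA
  rw [show (List.range 3) = [0, 1, 2] from rfl, pv_foldl_orElse] at hA
  simp only [pv_foldl_orElse] at hA
  rw [show (none : Option (Nat × Nat)).orElse
      (fun _ => List.findSome? (fun i => (none : Option (Nat × Nat)).orElse
        (fun _ => List.findSome? (fun j => pvScanCellA b i j) [0, 1, 2])) [0, 1, 2])
    = List.findSome? (fun i => List.findSome? (fun j => pvScanCellA b i j) [0, 1, 2]) [0, 1, 2]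
    from rfl] at hA
  obtain ⟨i, hi, hfi⟩ := List.exists_of_findSome?_eq_some hA
  obtain ⟨j, hj, hfj⟩ := List.exists_of_findSome?_eq_some hfi
  have := pv_scanCell_eq b i j _ hfj
  simp at this
  fin_cases hi <;> fin_cases hj <;> omega

-- the four direction elements: B's rebuilt board = A's double-set board
theorem pv_dir_up (b : List (List (Option Int))) (bi bj : Nat) (h1 : 1 ≤ bi) :
    pvSwapped b (bi : Int) (bj : Int) ((bi : Int) + -1) ((bj : Int) + 0)
      = pvSetCell (pvSetCell b bi bj
          ((b.getD ((bi : Int) + -1).toNat []).getD ((bj : Int) + 0).toNat none))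
          ((bi : Int) + -1).toNat ((bj : Int) + 0).toNat none := by
  have e1 : ((bi : Int) + -1) = ((bi - 1 : Nat) : Int) := by omega
  have e2 : ((bj : Int) + 0) = ((bj : Nat) : Int) := by omega
  rw [e1, e2, Int.toNat_natCast, Int.toNat_natCast]
  exact pv_swapped_eq b bi bj (bi - 1) bj (fun hh => by omega)

theorem pv_dir_down (b : List (List (Option Int))) (bi bj : Nat) :
    pvSwapped b (bi : Int) (bj : Int) ((bi : Int) + 1) ((bj : Int) + 0)
      = pvSetCell (pvSetCell b bi bj
          ((b.getD ((bi : Int) + 1).toNat []).getD ((bj : Int) + 0).toNat none))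
          ((bi : Int) + 1).toNat ((bj : Int) + 0).toNat none := by
  have e1 : ((bi : Int) + 1) = ((bi + 1 : Nat) : Int) := by omega
  have e2 : ((bj : Int) + 0) = ((bj : Nat) : Int) := by omega
  rw [e1, e2, Int.toNat_natCast, Int.toNat_natCast]
  exact pv_swapped_eq b bi bj (bi + 1) bj (fun hh => by omega)

theorem pv_dir_left (b : List (List (Option Int))) (bi bj : Nat) (h3 : 1 ≤ bj) :
    pvSwapped b (bi : Int) (bj : Int) ((bi : Int) + 0) ((bj : Int) + -1)
      = pvSetCell (pvSetCell b bi bj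
          ((b.getD ((bi : Int) + 0).toNat []).getD ((bj : Int) + -1).toNat none))
          ((bi : Int) + 0).toNat ((bj : Int) + -1).toNat none := by
  have e1 : ((bi : Int) + 0) = ((bi : Nat) : Int) := by omega
  have e2 : ((bj : Int) + -1) = ((bj - 1 : Nat) : Int) := by omega
  rw [e1, e2, Int.toNat_natCast, Int.toNat_natCast]
  exact pv_swapped_eq b bi bj bi (bj - 1) (fun hh => by omega)

theorem pv_dir_right (b : List (List (Option Int))) (bi bj : Nat) :
    pvSwapped b (bi : Int) (bj : Int) ((bi : Int) + 0) ((bj : Int) + 1)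
      = pvSetCell (pvSetCell b bi bj
          ((b.getD ((bi : Int) + 0).toNat []).getD ((bj : Int) + 1).toNat none))
          ((bi : Int) + 0).toNat ((bj : Int) + 1).toNat none := by
  have e1 : ((bi : Int) + 0) = ((bi : Nat) : Int) := by omega
  have e2 : ((bj : Int) + 1) = ((bj + 1 : Nat) : Int) := by omega
  rw [e1, e2, Int.toNat_natCast, Int.toNat_natCast]
  exact pv_swapped_eq b bi bj bi (bj + 1) (fun hh => by omega)

-- the ports agree on every input (outside Pre_ both Pythons raise; the ports both return values)
theorem pv_ports_eq (b : List (List (Option Int))) :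
    find_all_moves b = find_all_moves_alt b := by
  unfold find_all_moves find_all_moves_alt
  rw [show b.map (fun row => row) = b from by simp, pv_scan_eq]
  rcases hA : pvFindBlankA b with _ | p
  · simp [hA]
  · rcases p with ⟨bi, bj⟩
    obtain ⟨hbi3, hbj3⟩ := pv_blank_lt b bi bj hA
    simp only [hA, Option.map_some]
    simp only [List.filter_cons, List.filter_nil, Bool.and_eq_true, decide_eq_true_eq,
      List.foldl_cons, List.foldl_nil, List.map_cons, List.map_nil]
    have gu : (0 ≤ (bi:Int) + -1 ∧ (bi:Int) + -1 < 3 ∧ 0 ≤ (bj:Int) + 0 ∧ (bj:Int) + 0 < 3) ↔ 1 ≤ bi := by omega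
    have gu' : (((0 ≤ (bi:Int) + -1 ∧ (bi:Int) + -1 < 3) ∧ 0 ≤ (bj:Int) + 0) ∧ (bj:Int) + 0 < 3) ↔ 1 ≤ bi := by omega
    have gd : (0 ≤ (bi:Int) + 1 ∧ (bi:Int) + 1 < 3 ∧ 0 ≤ (bj:Int) + 0 ∧ (bj:Int) + 0 < 3) ↔ bi < 2 := by omega
    have gd' : (((0 ≤ (bi:Int) + 1 ∧ (bi:Int) + 1 < 3) ∧ 0 ≤ (bj:Int) + 0) ∧ (bj:Int) + 0 < 3) ↔ bi < 2 := by omega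
    have gl : (0 ≤ (bi:Int) + 0 ∧ (bi:Int) + 0 < 3 ∧ 0 ≤ (bj:Int) + -1 ∧ (bj:Int) + -1 < 3) ↔ 1 ≤ bj := by omega
    have gl' : (((0 ≤ (bi:Int) + 0 ∧ (bi:Int) + 0 < 3) ∧ 0 ≤ (bj:Int) + -1) ∧ (bj:Int) + -1 < 3) ↔ 1 ≤ bj := by omega
    have gr : (0 ≤ (bi:Int) + 0 ∧ (bi:Int) + 0 < 3 ∧ 0 ≤ (bj:Int) + 1 ∧ (bj:Int) + 1 < 3) ↔ bj < 2 := by omega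
    have gr' : (((0 ≤ (bi:Int) + 0 ∧ (bi:Int) + 0 < 3) ∧ 0 ≤ (bj:Int) + 1) ∧ (bj:Int) + 1 < 3) ↔ bj < 2 := by omega
    simp only [gu, gu', gd, gd', gl, gl', gr, gr']
    by_cases h1 : 1 ≤ bi <;> by_cases h2 : bi < 2 <;> by_cases h3 : 1 ≤ bj <;> by_cases h4 : bj < 2 <;>
      simp only [h1, h2, h3, h4, if_true, if_false, iff_true, iff_false,
        List.map_cons, List.map_nil, List.nil_append, List.cons_append, List.append_nil]
    all_goals simp only [h1, h2, h3, h4, pv_dir_up, pv_dir_down, pv_dir_left, pv_dir_right]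

-- ===== VERDICT (by name: the statement is the Claim_ definition above) =====
theorem find_all_moves_spec : Claim_equal_find_all_moves := by
  intro board_t _ _
  unfold Spec_find_all_moves
  exact pv_ports_eq board_t
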